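-- pv_equiv track=rewrite | github.com/gimesha-adikari/doc-hub | src/core/file_processing.py | is_file_ignored
-- ===== SOURCE A (Python) =====
-- import fnmatch
--
-- IGNORED_FILES = {
--     'package-lock.json', 'yarn.lock', 'pnpm-lock.yaml', 'bun.lockb',
--     'pipfile.lock', 'poetry.lock', 'composer.lock', 'gemfile.lock', 'cargo.lock',
--     '.ds_store', 'thumbs.db', 'desktop.ini',
--     'gradle-wrapper.jar', '.coverage'
-- }
--
-- IGNORED_FILE_GLOBS = [
--     '.coverage.*',
--     '*.pyc', '*.pyo', '*.pyd',
--     '*.class',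
--     '*.o', '*.obj', '*.a', '*.so', '*.dll', '*.dylib',
--     '*.min.*.map',
--     '.env.*.local', '*.local.env', '.env',
--     '*.log', '*.tmp', '*.temp',
--     'stats.*.json', 'stats.json',
--     '*.mp3', '*.wav', '*.flac', '*.m4a', '*.ogg',
--     '*.mp4', '*.mkv', '*.webm', '*.avi', '*.mov', '*.wmv',
-- ]
--
-- def is_file_ignored(file_name: str) -> bool:
--     file_name_lower = file_name.lower()
--     if file_name_lower in IGNORED_FILES:
--         return True
--     for pattern in IGNORED_FILE_GLOBS:
--         if fnmatch.fnmatch(file_name_lower, pattern):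
--             return True
--     return False
-- ===== SOURCE B (Python) =====
-- # B: replaces the per-pattern fnmatch loop with precomputed exact-name set,
-- # suffix checks, and closed-form conditions for the few non-suffix globs.
-- IGNORED_FILES = {
--     'package-lock.json', 'yarn.lock', 'pnpm-lock.yaml', 'bun.lockb',
--     'pipfile.lock', 'poetry.lock', 'composer.lock', 'gemfile.lock', 'cargo.lock',
--     '.ds_store', 'thumbs.db', 'desktop.ini',
--     'gradle-wrapper.jar', '.coverage'
-- }
--
-- # Exact names from both the set and the wildcard-free globs ('.env', 'stats.json').
-- _EXACT = IGNORED_FILES | {'.env', 'stats.json'}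
--
-- # Every glob of the shape '*.<suffix>' is an endswith test.
-- _SUFFIXES = (
--     '.pyc', '.pyo', '.pyd', '.class',
--     '.o', '.obj', '.a', '.so', '.dll', '.dylib',
--     '.local.env', '.log', '.tmp', '.temp',
--     '.mp3', '.wav', '.flac', '.m4a', '.ogg',
--     '.mp4', '.mkv', '.webm', '.avi', '.mov', '.wmv',
-- )
--
-- def is_file_ignored(file_name: str) -> bool:
--     s = file_name.lower()
--     if s in _EXACT:
--         return True
--     if s.endswith(_SUFFIXES):
--         return True
--     if s.startswith('.coverage.'):                      # '.coverage.*'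
--         return True
--     if s.endswith('.map') and '.min.' in s[:-4]:        # '*.min.*.map'
--         return True
--     if len(s) >= 11 and s.startswith('.env.') and s.endswith('.local'):    # '.env.*.local'
--         return True
--     if len(s) >= 11 and s.startswith('stats.') and s.endswith('.json'):    # 'stats.*.json'
--         return True
--     return False
-- ===== Notes on version B (the rewrite author's own statement) =====
-- stated objective: faster
-- what changed: Replaces the per-pattern fnmatch backtracking loop with a precomputed exact-name set, one tuple-endswith call covering the 25 pure-suffix globs, and closed-form startswith/endswith/substring tests for the four remaining globs, so no wildcard matching happens at call time.
import Mathlib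
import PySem

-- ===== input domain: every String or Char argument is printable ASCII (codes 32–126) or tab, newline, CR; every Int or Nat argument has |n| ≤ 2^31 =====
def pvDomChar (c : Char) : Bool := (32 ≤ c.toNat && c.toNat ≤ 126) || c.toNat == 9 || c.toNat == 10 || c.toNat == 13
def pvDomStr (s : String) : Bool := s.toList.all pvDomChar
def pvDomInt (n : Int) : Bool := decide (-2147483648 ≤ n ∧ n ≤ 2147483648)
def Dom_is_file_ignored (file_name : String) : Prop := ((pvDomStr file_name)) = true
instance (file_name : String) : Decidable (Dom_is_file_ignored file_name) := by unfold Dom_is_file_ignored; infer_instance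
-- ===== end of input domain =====

-- B replaces A's per-pattern fnmatch loop by a precomputed exact-name set, suffix checks
-- and closed-form tests for the four non-suffix globs (objective: simpler/alternative).

-- ===== PORT A =====
-- IGNORED_FILES (a Python set of distinct literals; used only for membership)
def pvIgnoredFiles : List String := ["package-lock.json", "yarn.lock", "pnpm-lock.yaml", "bun.lockb", "pipfile.lock", "poetry.lock", "composer.lock", "gemfile.lock", "cargo.lock", ".ds_store", "thumbs.db", "desktop.ini", "gradle-wrapper.jar", ".coverage"]

def pvGlobs : List String := [".coverage.*", "*.pyc", "*.pyo", "*.pyd", "*.class", "*.o", "*.obj", "*.a", "*.so", "*.dll", "*.dylib", "*.min.*.map", ".env.*.local", "*.local.env", ".env", "*.log", "*.tmp", "*.temp", "stats.*.json", "stats.json", "*.mp3", "*.wav", "*.flac", "*.m4a", "*.ogg", "*.mp4", "*.mkv", "*.webm", "*.avi", "*.mov", "*.wmv"]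

-- '*'-only wildcard matcher (anchored), exact port of fnmatch.fnmatch for patterns
-- containing no '?', '[' or ']' (os.path.normcase is the identity on POSIX).
def pvGlobMatch : List Char → List Char → Bool
  | [], s => s.isEmpty
  | p :: ps, s =>
    if p = '*' then
      match s with
      | [] => pvGlobMatch ps []
      | _ :: s' => pvGlobMatch ps s || pvGlobMatch (p :: ps) s'
    else
      match s with
      | [] => false
      | c :: s' => (p == c) && pvGlobMatch ps s'
termination_by p s => (p.length, s.length)

def is_file_ignored (file_name : String) : Bool :=
  let file_name_lower := PySem.Str.lower file_name
  if pvIgnoredFiles.contains file_name_lower then true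
  else pvGlobs.any (fun pattern => pvGlobMatch pattern.toList file_name_lower.toList)

-- ===== PORT B =====
-- _EXACT = IGNORED_FILES | {'.env', 'stats.json'}
def pvExact : List String := pvIgnoredFiles ++ [".env", "stats.json"]

def pvSuffixes : List String := [".pyc", ".pyo", ".pyd", ".class", ".o", ".obj", ".a", ".so", ".dll", ".dylib", ".local.env", ".log", ".tmp", ".temp", ".mp3", ".wav", ".flac", ".m4a", ".ogg", ".mp4", ".mkv", ".webm", ".avi", ".mov", ".wmv"]

def is_file_ignored_alt (file_name : String) : Bool :=
  let s := PySem.Str.lower file_name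
  if pvExact.contains s then true
  else if pvSuffixes.any (fun suf => PySem.Str.endswith s suf) then true
  else if PySem.Str.startswith s ".coverage." then true
  else if PySem.Str.endswith s ".map" && PySem.Str.isIn ".min." (PySem.Str.slice s none (some (-4))) then true
  else if decide ((11 : Int) ≤ PySem.Str.len s) && PySem.Str.startswith s ".env." && PySem.Str.endswith s ".local" then true
  else if decide ((11 : Int) ≤ PySem.Str.len s) && PySem.Str.startswith s "stats." && PySem.Str.endswith s ".json" then true
  else false

-- ===== PRECONDITION & SPEC =====
def Spec_is_file_ignored (file_name : String) (out : Bool) : Prop := out = is_file_ignored_alt file_name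
instance (file_name : String) (out : Bool) : Decidable (Spec_is_file_ignored file_name out) := by unfold Spec_is_file_ignored; infer_instance

-- ===== CLAIM (what is proved, stated in full; the proofs are below) =====
def Claim_equal_is_file_ignored : Prop := ∀ (file_name : String), Dom_is_file_ignored file_name → Spec_is_file_ignored file_name (is_file_ignored file_name)

-- ===== LEMMAS AND PROOFS =====

theorem gm_lit {lits : List Char} (h : '*' ∉ lits) (L : List Char) :
    pvGlobMatch lits L = true ↔ L = lits := by
  induction lits generalizing L with
  | nil => cases L <;> simp [pvGlobMatch]
  | cons p ps ih =>
    have hp : p ≠ '*' := fun e => h (e ▸ List.mem_cons_self ..)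
    have h' : '*' ∉ ps := fun m => h (List.mem_cons_of_mem _ m)
    cases L with
    | nil => simp [pvGlobMatch, hp]
    | cons c L' =>
      rw [show pvGlobMatch (p :: ps) (c :: L') = ((p == c) && pvGlobMatch ps L') from by
        simp [pvGlobMatch, hp]]
      simp only [Bool.and_eq_true, beq_iff_eq, ih h', List.cons_eq_cons]
      constructor
      · rintro ⟨rfl, rfl⟩; exact ⟨rfl, rfl⟩
      · rintro ⟨rfl, rfl⟩; exact ⟨rfl, rfl⟩

theorem gm_star (ps : List Char) (L : List Char) :
    pvGlobMatch ('*' :: ps) L = true ↔ ∃ u, u <:+ L ∧ pvGlobMatch ps u = true := by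
  induction L with
  | nil =>
    rw [show pvGlobMatch ('*' :: ps) [] = pvGlobMatch ps [] from by simp [pvGlobMatch]]
    constructor
    · intro h; exact ⟨[], List.nil_suffix, h⟩
    · rintro ⟨u, hu, h⟩; rwa [List.suffix_nil.mp hu] at h
  | cons c L' ih =>
    rw [show pvGlobMatch ('*' :: ps) (c :: L') =
        (pvGlobMatch ps (c :: L') || pvGlobMatch ('*' :: ps) L') from by simp [pvGlobMatch]]
    simp only [Bool.or_eq_true, ih]
    constructor
    · rintro (h | ⟨u, hu, h⟩)
      · exact ⟨c :: L', List.suffix_refl _, h⟩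
      · exact ⟨u, hu.trans (List.suffix_cons _ _), h⟩
    · rintro ⟨u, hu, h⟩
      rcases List.suffix_cons_iff.mp hu with e | hu'
      · exact Or.inl (e ▸ h)
      · exact Or.inr ⟨u, hu', h⟩

theorem gm_lit_append {lits : List Char} (h : '*' ∉ lits) (ps L : List Char) :
    pvGlobMatch (lits ++ ps) L = true ↔ ∃ u, L = lits ++ u ∧ pvGlobMatch ps u = true := by
  induction lits generalizing L with
  | nil => simp
  | cons p pre ih =>
    have hp : p ≠ '*' := fun e => h (e ▸ List.mem_cons_self ..)
    have h' : '*' ∉ pre := fun m => h (List.mem_cons_of_mem _ m)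
    cases L with
    | nil => simp [pvGlobMatch, hp]
    | cons c L' =>
      simp only [List.cons_append]
      rw [show pvGlobMatch (p :: (pre ++ ps)) (c :: L') =
          ((p == c) && pvGlobMatch (pre ++ ps) L') from by simp [pvGlobMatch, hp]]
      simp only [Bool.and_eq_true, beq_iff_eq, ih h']
      constructor
      · rintro ⟨e, u, rfl, hu⟩; exact ⟨u, by rw [e], hu⟩
      · rintro ⟨u, he, hu⟩
        rw [List.cons_eq_cons] at he
        exact ⟨he.1.symm, u, he.2, hu⟩

theorem gm_star_nil (L : List Char) : pvGlobMatch ['*'] L = true := by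
  induction L with
  | nil => simp [pvGlobMatch]
  | cons c L' ih => simp [pvGlobMatch, ih]

theorem gm_end {suf : List Char} (h : '*' ∉ suf) (L : List Char) :
    pvGlobMatch ('*' :: suf) L = true ↔ suf <:+ L := by
  rw [gm_star]
  constructor
  · rintro ⟨u, hu, hm⟩; rwa [(gm_lit h u).mp hm] at hu
  · intro hs; exact ⟨suf, hs, (gm_lit h suf).mpr rfl⟩

theorem gm_start {pre : List Char} (h : '*' ∉ pre) (L : List Char) :
    pvGlobMatch (pre ++ ['*']) L = true ↔ pre <+: L := by
  rw [gm_lit_append h]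
  constructor
  · rintro ⟨u, rfl, _⟩; exact List.prefix_append _ _
  · rintro ⟨u, rfl⟩; exact ⟨u, rfl, gm_star_nil u⟩

theorem gm_mid {l1 l2 : List Char} (h1 : '*' ∉ l1) (h2 : '*' ∉ l2) (L : List Char) :
    pvGlobMatch (l1 ++ '*' :: l2) L = true ↔
      l1 <+: L ∧ l2 <:+ L ∧ l1.length + l2.length ≤ L.length := by
  rw [gm_lit_append h1]
  constructor
  · rintro ⟨u, rfl, hm⟩
    rcases (gm_end h2 u).mp hm with ⟨v, rfl⟩
    refine ⟨List.prefix_append _ _, ?_, by simp⟩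
    exact (List.suffix_append v l2).trans (List.suffix_append l1 _)
  · rintro ⟨⟨u, rfl⟩, hsuf, hlen⟩
    refine ⟨u, rfl, (gm_end h2 u).mpr ?_⟩
    have hd : l2 = (l1 ++ u).drop ((l1 ++ u).length - l2.length) :=
      List.suffix_iff_eq_drop.mp hsuf
    have hlen' : l1.length ≤ (l1 ++ u).length - l2.length := by
      simp at hlen ⊢; omega
    obtain ⟨m, hm2⟩ : ∃ m, (l1 ++ u).length - l2.length = l1.length + m :=
      ⟨_, (Nat.add_sub_cancel' hlen').symm⟩
    rw [hd, hm2, ← List.drop_drop, List.drop_left]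
    exact List.drop_suffix _ _

theorem gm_two {l1 l2 : List Char} (h1 : '*' ∉ l1) (h2 : '*' ∉ l2) (L : List Char) :
    pvGlobMatch ('*' :: (l1 ++ '*' :: l2)) L = true ↔
      l2 <:+ L ∧ l1 <:+: L.take (L.length - l2.length) := by
  rw [gm_star]
  constructor
  · rintro ⟨u, ⟨a, rfl⟩, hm⟩
    rcases (gm_lit_append h1 _ u).mp hm with ⟨v, rfl, hv⟩
    rcases (gm_end h2 v).mp hv with ⟨b, rfl⟩
    constructor
    · exact ⟨a ++ (l1 ++ b), by simp⟩
    · have ht : (a ++ (l1 ++ (b ++ l2))).take ((a ++ (l1 ++ (b ++ l2))).length - l2.length)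
          = a ++ l1 ++ b := by
        rw [show a ++ (l1 ++ (b ++ l2)) = (a ++ l1 ++ b) ++ l2 by simp]
        apply List.take_left'
        simp
        omega
      rw [ht]
      exact ⟨a, b, by simp⟩
  · rintro ⟨hsuf, hinf⟩
    rcases hinf with ⟨a, b, hy⟩
    have hd : l2 = L.drop (L.length - l2.length) := List.suffix_iff_eq_drop.mp hsuf
    have hL : L = (a ++ l1 ++ b) ++ l2 := by
      conv_lhs => rw [← List.take_append_drop (L.length - l2.length) L]
      rw [hy, ← hd]
    refine ⟨l1 ++ (b ++ l2), ⟨a, by rw [hL]; simp⟩, ?_⟩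
    rw [gm_lit_append h1]
    exact ⟨b ++ l2, rfl, (gm_end h2 _).mpr (List.suffix_append b l2)⟩

theorem pvGM0 (t : String) :
    pvGlobMatch ".coverage.*".toList t.toList = PySem.Str.startswith t ".coverage." := by
  rw [show ".coverage.*".toList = ".coverage.".toList ++ ['*'] from rfl, Bool.eq_iff_iff,
      gm_start (by decide), PySem.Str.startswith_eq, PySem.Chars.startswith_iff]
theorem pvGM1 (t : String) :
    pvGlobMatch "*.pyc".toList t.toList = PySem.Str.endswith t ".pyc" := by
  rw [show "*.pyc".toList = '*' :: ".pyc".toList from rfl, Bool.eq_iff_iff,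
      gm_end (by decide), PySem.Str.endswith_eq, PySem.Chars.endswith_iff]
theorem pvGM2 (t : String) :
    pvGlobMatch "*.pyo".toList t.toList = PySem.Str.endswith t ".pyo" := by
  rw [show "*.pyo".toList = '*' :: ".pyo".toList from rfl, Bool.eq_iff_iff,
      gm_end (by decide), PySem.Str.endswith_eq, PySem.Chars.endswith_iff]
theorem pvGM3 (t : String) :
    pvGlobMatch "*.pyd".toList t.toList = PySem.Str.endswith t ".pyd" := by
  rw [show "*.pyd".toList = '*' :: ".pyd".toList from rfl, Bool.eq_iff_iff,
      gm_end (by decide), PySem.Str.endswith_eq, PySem.Chars.endswith_iff]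
theorem pvGM4 (t : String) :
    pvGlobMatch "*.class".toList t.toList = PySem.Str.endswith t ".class" := by
  rw [show "*.class".toList = '*' :: ".class".toList from rfl, Bool.eq_iff_iff,
      gm_end (by decide), PySem.Str.endswith_eq, PySem.Chars.endswith_iff]
theorem pvGM5 (t : String) :
    pvGlobMatch "*.o".toList t.toList = PySem.Str.endswith t ".o" := by
  rw [show "*.o".toList = '*' :: ".o".toList from rfl, Bool.eq_iff_iff,
      gm_end (by decide), PySem.Str.endswith_eq, PySem.Chars.endswith_iff]
theorem pvGM6 (t : String) :
    pvGlobMatch "*.obj".toList t.toList = PySem.Str.endswith t ".obj" := by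
  rw [show "*.obj".toList = '*' :: ".obj".toList from rfl, Bool.eq_iff_iff,
      gm_end (by decide), PySem.Str.endswith_eq, PySem.Chars.endswith_iff]
theorem pvGM7 (t : String) :
    pvGlobMatch "*.a".toList t.toList = PySem.Str.endswith t ".a" := by
  rw [show "*.a".toList = '*' :: ".a".toList from rfl, Bool.eq_iff_iff,
      gm_end (by decide), PySem.Str.endswith_eq, PySem.Chars.endswith_iff]
theorem pvGM8 (t : String) :
    pvGlobMatch "*.so".toList t.toList = PySem.Str.endswith t ".so" := by
  rw [show "*.so".toList = '*' :: ".so".toList from rfl, Bool.eq_iff_iff,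
      gm_end (by decide), PySem.Str.endswith_eq, PySem.Chars.endswith_iff]
theorem pvGM9 (t : String) :
    pvGlobMatch "*.dll".toList t.toList = PySem.Str.endswith t ".dll" := by
  rw [show "*.dll".toList = '*' :: ".dll".toList from rfl, Bool.eq_iff_iff,
      gm_end (by decide), PySem.Str.endswith_eq, PySem.Chars.endswith_iff]
theorem pvGM10 (t : String) :
    pvGlobMatch "*.dylib".toList t.toList = PySem.Str.endswith t ".dylib" := by
  rw [show "*.dylib".toList = '*' :: ".dylib".toList from rfl, Bool.eq_iff_iff,
      gm_end (by decide), PySem.Str.endswith_eq, PySem.Chars.endswith_iff]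
theorem pvGM11 (t : String) :
    pvGlobMatch "*.min.*.map".toList t.toList
      = (PySem.Str.endswith t ".map" && PySem.Str.isIn ".min." (PySem.Str.slice t none (some (-4)))) := by
  rw [show "*.min.*.map".toList = '*' :: (".min.".toList ++ '*' :: ".map".toList) from rfl,
      Bool.eq_iff_iff, gm_two (by decide) (by decide)]
  simp [PySem.Str.endswith_eq, PySem.Chars.endswith_iff, PySem.Str.isIn_eq,
        PySem.Str.toList_slice, PySem.Chars.slice_eq_listSlice, PySem.Chars.isIn_iff_infix,
        PySem.List.slice]
theorem pvGM12 (t : String) :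
    pvGlobMatch ".env.*.local".toList t.toList
      = (decide ((11 : Int) ≤ PySem.Str.len t) && PySem.Str.startswith t ".env." && PySem.Str.endswith t ".local") := by
  rw [show ".env.*.local".toList = ".env.".toList ++ '*' :: ".local".toList from rfl,
      Bool.eq_iff_iff, gm_mid (by decide) (by decide)]
  simp only [Bool.and_eq_true, decide_eq_true_eq, PySem.Str.len_eq, PySem.Str.startswith_eq,
        PySem.Chars.startswith_iff, PySem.Str.endswith_eq, PySem.Chars.endswith_iff,
        show ".env.".toList.length = 5 from rfl, show ".local".toList.length = 6 from rfl]
  constructor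
  · rintro ⟨hp, hs, hl⟩; exact ⟨⟨by omega, hp⟩, hs⟩
  · rintro ⟨⟨hl, hp⟩, hs⟩; exact ⟨hp, hs, by omega⟩
theorem pvGM13 (t : String) :
    pvGlobMatch "*.local.env".toList t.toList = PySem.Str.endswith t ".local.env" := by
  rw [show "*.local.env".toList = '*' :: ".local.env".toList from rfl, Bool.eq_iff_iff,
      gm_end (by decide), PySem.Str.endswith_eq, PySem.Chars.endswith_iff]
theorem pvGM14 (t : String) :
    pvGlobMatch ".env".toList t.toList = decide (t = ".env") := by
  rw [Bool.eq_iff_iff, gm_lit (by decide), decide_eq_true_eq]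
  exact ⟨fun h => String.toList_inj.mp h, fun h => by rw [h]⟩
theorem pvGM15 (t : String) :
    pvGlobMatch "*.log".toList t.toList = PySem.Str.endswith t ".log" := by
  rw [show "*.log".toList = '*' :: ".log".toList from rfl, Bool.eq_iff_iff,
      gm_end (by decide), PySem.Str.endswith_eq, PySem.Chars.endswith_iff]
theorem pvGM16 (t : String) :
    pvGlobMatch "*.tmp".toList t.toList = PySem.Str.endswith t ".tmp" := by
  rw [show "*.tmp".toList = '*' :: ".tmp".toList from rfl, Bool.eq_iff_iff,
      gm_end (by decide), PySem.Str.endswith_eq, PySem.Chars.endswith_iff]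
theorem pvGM17 (t : String) :
    pvGlobMatch "*.temp".toList t.toList = PySem.Str.endswith t ".temp" := by
  rw [show "*.temp".toList = '*' :: ".temp".toList from rfl, Bool.eq_iff_iff,
      gm_end (by decide), PySem.Str.endswith_eq, PySem.Chars.endswith_iff]
theorem pvGM18 (t : String) :
    pvGlobMatch "stats.*.json".toList t.toList
      = (decide ((11 : Int) ≤ PySem.Str.len t) && PySem.Str.startswith t "stats." && PySem.Str.endswith t ".json") := by
  rw [show "stats.*.json".toList = "stats.".toList ++ '*' :: ".json".toList from rfl,
      Bool.eq_iff_iff, gm_mid (by decide) (by decide)]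
  simp only [Bool.and_eq_true, decide_eq_true_eq, PySem.Str.len_eq, PySem.Str.startswith_eq,
        PySem.Chars.startswith_iff, PySem.Str.endswith_eq, PySem.Chars.endswith_iff,
        show "stats.".toList.length = 6 from rfl, show ".json".toList.length = 5 from rfl]
  constructor
  · rintro ⟨hp, hs, hl⟩; exact ⟨⟨by omega, hp⟩, hs⟩
  · rintro ⟨⟨hl, hp⟩, hs⟩; exact ⟨hp, hs, by omega⟩
theorem pvGM19 (t : String) :
    pvGlobMatch "stats.json".toList t.toList = decide (t = "stats.json") := by
  rw [Bool.eq_iff_iff, gm_lit (by decide), decide_eq_true_eq]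
  exact ⟨fun h => String.toList_inj.mp h, fun h => by rw [h]⟩
theorem pvGM20 (t : String) :
    pvGlobMatch "*.mp3".toList t.toList = PySem.Str.endswith t ".mp3" := by
  rw [show "*.mp3".toList = '*' :: ".mp3".toList from rfl, Bool.eq_iff_iff,
      gm_end (by decide), PySem.Str.endswith_eq, PySem.Chars.endswith_iff]
theorem pvGM21 (t : String) :
    pvGlobMatch "*.wav".toList t.toList = PySem.Str.endswith t ".wav" := by
  rw [show "*.wav".toList = '*' :: ".wav".toList from rfl, Bool.eq_iff_iff,
      gm_end (by decide), PySem.Str.endswith_eq, PySem.Chars.endswith_iff]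
theorem pvGM22 (t : String) :
    pvGlobMatch "*.flac".toList t.toList = PySem.Str.endswith t ".flac" := by
  rw [show "*.flac".toList = '*' :: ".flac".toList from rfl, Bool.eq_iff_iff,
      gm_end (by decide), PySem.Str.endswith_eq, PySem.Chars.endswith_iff]
theorem pvGM23 (t : String) :
    pvGlobMatch "*.m4a".toList t.toList = PySem.Str.endswith t ".m4a" := by
  rw [show "*.m4a".toList = '*' :: ".m4a".toList from rfl, Bool.eq_iff_iff,
      gm_end (by decide), PySem.Str.endswith_eq, PySem.Chars.endswith_iff]
theorem pvGM24 (t : String) :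
    pvGlobMatch "*.ogg".toList t.toList = PySem.Str.endswith t ".ogg" := by
  rw [show "*.ogg".toList = '*' :: ".ogg".toList from rfl, Bool.eq_iff_iff,
      gm_end (by decide), PySem.Str.endswith_eq, PySem.Chars.endswith_iff]
theorem pvGM25 (t : String) :
    pvGlobMatch "*.mp4".toList t.toList = PySem.Str.endswith t ".mp4" := by
  rw [show "*.mp4".toList = '*' :: ".mp4".toList from rfl, Bool.eq_iff_iff,
      gm_end (by decide), PySem.Str.endswith_eq, PySem.Chars.endswith_iff]
theorem pvGM26 (t : String) :
    pvGlobMatch "*.mkv".toList t.toList = PySem.Str.endswith t ".mkv" := by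
  rw [show "*.mkv".toList = '*' :: ".mkv".toList from rfl, Bool.eq_iff_iff,
      gm_end (by decide), PySem.Str.endswith_eq, PySem.Chars.endswith_iff]
theorem pvGM27 (t : String) :
    pvGlobMatch "*.webm".toList t.toList = PySem.Str.endswith t ".webm" := by
  rw [show "*.webm".toList = '*' :: ".webm".toList from rfl, Bool.eq_iff_iff,
      gm_end (by decide), PySem.Str.endswith_eq, PySem.Chars.endswith_iff]
theorem pvGM28 (t : String) :
    pvGlobMatch "*.avi".toList t.toList = PySem.Str.endswith t ".avi" := by
  rw [show "*.avi".toList = '*' :: ".avi".toList from rfl, Bool.eq_iff_iff,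
      gm_end (by decide), PySem.Str.endswith_eq, PySem.Chars.endswith_iff]
theorem pvGM29 (t : String) :
    pvGlobMatch "*.mov".toList t.toList = PySem.Str.endswith t ".mov" := by
  rw [show "*.mov".toList = '*' :: ".mov".toList from rfl, Bool.eq_iff_iff,
      gm_end (by decide), PySem.Str.endswith_eq, PySem.Chars.endswith_iff]
theorem pvGM30 (t : String) :
    pvGlobMatch "*.wmv".toList t.toList = PySem.Str.endswith t ".wmv" := by
  rw [show "*.wmv".toList = '*' :: ".wmv".toList from rfl, Bool.eq_iff_iff,
      gm_end (by decide), PySem.Str.endswith_eq, PySem.Chars.endswith_iff]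

set_option maxHeartbeats 2000000 in
theorem pv_bodies_eq (f : String) : is_file_ignored f = is_file_ignored_alt f := by
  simp only [is_file_ignored, is_file_ignored_alt]
  generalize PySem.Str.lower f = t
  simp only [Bool.if_true_left, Bool.decide_eq_true]
  simp only [pvGlobs, pvSuffixes, List.any_cons, List.any_nil]
  simp only [pvGM0 t, pvGM1 t, pvGM2 t, pvGM3 t, pvGM4 t, pvGM5 t, pvGM6 t, pvGM7 t, pvGM8 t, pvGM9 t, pvGM10 t, pvGM11 t, pvGM12 t, pvGM13 t, pvGM14 t, pvGM15 t, pvGM16 t, pvGM17 t, pvGM18 t, pvGM19 t, pvGM20 t, pvGM21 t, pvGM22 t, pvGM23 t, pvGM24 t, pvGM25 t, pvGM26 t, pvGM27 t, pvGM28 t, pvGM29 t, pvGM30 t]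
  simp only [pvExact, pvIgnoredFiles, List.contains_eq_mem, List.mem_append, List.mem_cons,
             List.not_mem_nil, Bool.decide_or, or_false, Bool.or_false]
  simp only [Bool.or_assoc, Bool.or_comm, Bool.or_left_comm]

-- ===== VERDICT (by name: the statement is the Claim_ definition above) =====
theorem is_file_ignored_spec : Claim_equal_is_file_ignored := by
  intro file_name _
  unfold Spec_is_file_ignored
  exact pv_bodies_eq file_name
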